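-- pv_equiv track=rewrite | github.com/chengmark/ibm-test | Q1/solution.py | toVal
-- ===== SOURCE A (Python) =====
-- def toVal(size):
--     val = 0
--     mult = 1 if "M" in size or "L" in size else -1
--     for char in size:
--         if(char == "X"):
--             val = val + (1 * mult)
--         if(char == "S"):
--             val -= 1
--         if(char == "L"):
--             val += 1
--     return val
-- ===== SOURCE B (Python) =====
-- def toVal(size):
--     if not size:
--         return 0
--
--     def go(lo, hi):
--         # summary of size[lo:hi]: (#X, #L - #S, contains M or L)
--         if hi - lo == 1:
--             c = size[lo]
--             return (int(c == "X"), int(c == "L") - int(c == "S"), c == "M" or c == "L")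
--         mid = (lo + hi) // 2
--         x1, b1, m1 = go(lo, mid)
--         x2, b2, m2 = go(mid, hi)
--         return (x1 + x2, b1 + b2, m1 or m2)
--
--     x, base, hasml = go(0, len(size))
--     return base + (x if hasml else -x)
-- ===== Notes on version B (the rewrite author's own statement) =====
-- stated objective: alternative
-- what changed: Replaces A's membership prescan plus single accumulator loop by a divide-and-conquer over the index range that combines (X-count, L-minus-S base, has-M-or-L) summaries monoidally and applies the sign decision once at the end.
import Mathlib
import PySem

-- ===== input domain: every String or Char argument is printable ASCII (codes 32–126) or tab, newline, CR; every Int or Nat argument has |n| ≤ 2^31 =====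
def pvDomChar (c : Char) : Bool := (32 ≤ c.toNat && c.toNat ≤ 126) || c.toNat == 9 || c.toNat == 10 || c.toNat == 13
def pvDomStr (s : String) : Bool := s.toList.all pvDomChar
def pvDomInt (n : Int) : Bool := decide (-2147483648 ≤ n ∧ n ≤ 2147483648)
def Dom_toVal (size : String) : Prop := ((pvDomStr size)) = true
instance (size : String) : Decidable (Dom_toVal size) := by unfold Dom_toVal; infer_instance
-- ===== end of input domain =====

-- B replaces A's membership prescan + accumulator loop by a divide-and-conquer over the
-- index range combining (X-count, L−S base, has-M-or-L) summaries, sign applied at the end.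

-- ===== PORT A =====
def toVal (size : String) : Int :=
  let val : Int := 0
  let mult : Int := if PySem.Str.isIn "M" size || PySem.Str.isIn "L" size then 1 else -1
  size.toList.foldl (fun val char =>
    let val := if char = 'X' then val + 1 * mult else val
    let val := if char = 'S' then val - 1 else val
    if char = 'L' then val + 1 else val) val

-- ===== PORT B =====
-- go(lo, hi): summary of size[lo:hi].  The 'hi ≤ lo' branch is a totality guard only
-- (B never calls go on an empty range).
def toValGo (chars : List Char) (lo hi : Nat) : Int × Int × Bool :=
  if hi - lo = 1 then
    let c := chars.getD lo ' '   -- in-range index in B (lo < hi ≤ length)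
    ((if c = 'X' then 1 else 0), (if c = 'L' then 1 else 0) - (if c = 'S' then 1 else 0),
      c = 'M' || c = 'L')
  else if hi ≤ lo then (0, 0, false)  -- unreachable totality guard
  else
    let mid := (lo + hi) / 2
    let (x1, b1, m1) := toValGo chars lo mid
    let (x2, b2, m2) := toValGo chars mid hi
    (x1 + x2, b1 + b2, m1 || m2)
termination_by hi - lo
decreasing_by all_goals omega

def toVal_alt (size : String) : Int :=
  if size.toList.length = 0 then 0
  else
    let (x, base, hasml) := toValGo size.toList 0 size.toList.length
    base + (if hasml then x else -x)

-- ===== PRECONDITION & SPEC =====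
def Spec_toVal (size : String) (out : Int) : Prop := out = toVal_alt size
instance (size : String) (out : Int) : Decidable (Spec_toVal size out) := by
  unfold Spec_toVal; infer_instance

-- ===== CLAIM =====
def Claim_equal_toVal : Prop := ∀ (size : String), Dom_toVal size → Spec_toVal size (toVal size)

-- ===== LEMMAS AND PROOFS =====

-- the summary B's divide-and-conquer computes on a segment
def pvMix (l : List Char) : Int × Int × Bool :=
  ((l.count 'X' : Int), ((l.count 'L' : Int) - (l.count 'S' : Int)),
    l.any (fun c => c = 'M' || c = 'L'))

theorem pvMix_single (c : Char) :
    pvMix [c] = ((if c = 'X' then 1 else 0),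
      (if c = 'L' then 1 else 0) - (if c = 'S' then 1 else 0), (c = 'M' || c = 'L')) := by
  simp only [pvMix, List.count_cons, List.count_nil, List.any_cons, List.any_nil,
    Bool.or_false]
  simp only [Prod.mk.injEq]
  refine ⟨?_, ?_, trivial⟩ <;> split_ifs <;> simp_all

theorem toValGo_eq (chars : List Char) :
    ∀ (n lo hi : Nat), hi - lo = n → lo < hi → hi ≤ chars.length →
      toValGo chars lo hi = pvMix ((chars.drop lo).take (hi - lo)) := by
  intro n
  induction n using Nat.strong_induction_on with
  | _ n ih =>
    intro lo hi hn hlt hle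
    rcases Nat.lt_or_ge (hi - lo) 2 with h2 | h2
    · -- base case: hi = lo + 1
      have h1 : hi - lo = 1 := by omega
      have hlo : lo < chars.length := by omega
      rw [toValGo, if_pos h1, h1, List.drop_eq_getElem_cons hlo]
      simp only [List.take_succ_cons, List.take_zero, pvMix_single,
        List.getD_eq_getElem chars ' ' hlo]
    · -- recursive case: split at mid and combine the two summaries
      have hne : ¬ (hi - lo = 1) := by omega
      have hmid1 : lo < (lo + hi) / 2 := by omega
      have hmid2 : (lo + hi) / 2 < hi := by omega
      have e1 := ih (((lo + hi) / 2) - lo) (by omega) lo ((lo + hi) / 2) rfl hmid1 (by omega)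
      have e2 := ih (hi - ((lo + hi) / 2)) (by omega) ((lo + hi) / 2) hi rfl hmid2 hle
      rw [toValGo, if_neg hne, if_neg (by omega)]
      have hsplit : (chars.drop lo).take (hi - lo)
          = (chars.drop lo).take ((lo + hi) / 2 - lo)
            ++ (chars.drop ((lo + hi) / 2)).take (hi - (lo + hi) / 2) := by
        have h3 : hi - lo = ((lo + hi) / 2 - lo) + (hi - (lo + hi) / 2) := by omega
        rw [h3, List.take_add, List.drop_drop, Nat.add_sub_cancel' (Nat.le_of_lt hmid1)]
      simp only [e1, e2, hsplit, pvMix, List.count_append, List.any_append,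
        Prod.mk.injEq]
      push_cast
      refine ⟨by ring, by ring, trivial⟩

-- A's loop computes the closed form, for any fixed mult and start value
theorem pv_foldl_closed (m : Int) (l : List Char) : ∀ (a : Int),
    l.foldl (fun val char =>
      let val := if char = 'X' then val + 1 * m else val
      let val := if char = 'S' then val - 1 else val
      if char = 'L' then val + 1 else val) a
    = a + (l.count 'X' : Int) * m + (l.count 'L' : Int) - (l.count 'S' : Int) := by
  induction l with
  | nil => intro a; simp
  | cons x t ih =>
    intro a
    simp only [List.foldl_cons, ih, List.count_cons]
    by_cases hX : x = 'X' <;> by_cases hS : x = 'S' <;> by_cases hL : x = 'L' <;>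
      simp_all <;> ring

-- single-character substring containment is membership
theorem pv_isIn_single (c : Char) (sub s : String) (h : sub.toList = [c]) :
    PySem.Str.isIn sub s = s.toList.contains c := by
  rcases hc : s.toList.contains c with _ | _
  · rw [Bool.eq_false_iff]
    intro habs
    have hm := ((PySem.Str.isIn_iff_infix sub s).mp habs).subset
      (a := c) (by rw [h]; exact List.mem_singleton_self c)
    simp_all
  · apply (PySem.Str.isIn_iff_infix sub s).mpr
    obtain ⟨u, v, huv⟩ := List.append_of_mem (List.contains_iff_mem.mp hc)
    exact ⟨u, v, by rw [h]; simpa using huv.symm⟩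

-- ===== VERDICT =====
theorem toVal_spec : Claim_equal_toVal := by
  intro size _
  unfold Spec_toVal toVal toVal_alt
  rw [pv_foldl_closed, pv_isIn_single 'M' "M" size rfl, pv_isIn_single 'L' "L" size rfl]
  by_cases h0 : size.toList.length = 0
  · rw [if_pos h0, List.length_eq_zero_iff.mp h0]
    simp
  · rw [if_neg h0]
    have e := toValGo_eq size.toList size.toList.length 0 size.toList.length rfl
      (Nat.pos_of_ne_zero h0) le_rfl
    simp only [e, List.drop_zero, Nat.sub_zero, List.take_length, pvMix]
    rcases hany : size.toList.any (fun c => c = 'M' || c = 'L') with _ | _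
    · simp only [List.any_eq_false] at hany
      have hmM : 'M' ∉ size.toList := fun hmem => by have := hany _ hmem; simp_all
      have hmL : 'L' ∉ size.toList := fun hmem => by have := hany _ hmem; simp_all
      have hcM : size.toList.contains 'M' = false := by simpa using hmM
      have hcL : size.toList.contains 'L' = false := by simpa using hmL
      rw [hcM, hcL]
      simp only [Bool.or_self, Bool.false_eq_true, if_false]
      ring
    · simp only [List.any_eq_true] at hany
      obtain ⟨x, hx, hxp⟩ := hany
      have hor : (size.toList.contains 'M' || size.toList.contains 'L') = true := by
        rcases (by simpa using hxp : x = 'M' ∨ x = 'L') with rfl | rfl <;>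
          simp [hx]
      rw [hor]
      simp only [if_true]
      ring
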